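-- pv_equiv track=rewrite | github.com/vaneEmy/Algorithms | Python/are_similar.py | solution
-- ===== SOURCE A (Python) =====
-- def solution(a, b):
--     was_swapped = False
--     swapped_numbers = None
--
--     for ele_a, ele_b in zip(a,b):
--         """
--             si son diferentes:
--                 1. es que sea la primera vez -> lo agregamos a swaped_numbers
--                 2. es la segunda vez y los numeros coinciden -> was_swaped = true
--                 3. es la tercera vez o los numeros no coinciden -> return false
--         """
--         are_different = ele_a != ele_b
--         swapped_are_equal = (ele_b, ele_a) == swapped_numbers
--
--         if swapped_numbers is None and are_different:
--             swapped_numbers = (ele_a, ele_b)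
--         elif (
--             swapped_numbers is not None
--             and are_different
--             and swapped_are_equal
--             and not was_swapped
--         ):
--             was_swapped = True
--         elif (
--             swapped_numbers is not None
--             and ele_a != ele_b
--             and (not swapped_are_equal or was_swapped)
--         ):
--             return False
--
--     return True
-- ===== SOURCE B (Python) =====
-- def solution(a, b):
--     diffs = [(x, y) for x, y in zip(a, b) if x != y]
--     if len(diffs) <= 1:
--         return True
--     if len(diffs) == 2:
--         return diffs[0] == (diffs[1][1], diffs[1][0])
--     return False
-- ===== Notes on version B (the rewrite author's own statement) =====
-- stated objective: simpler
-- what changed: Replaces A's stateful one-pass branch machine (swapped_numbers/was_swapped flags) with a collect-then-classify decomposition: gather the differing pairs, then decide by their count (<=1 true, ==2 reversed-pair check, else false).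
import Mathlib
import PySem

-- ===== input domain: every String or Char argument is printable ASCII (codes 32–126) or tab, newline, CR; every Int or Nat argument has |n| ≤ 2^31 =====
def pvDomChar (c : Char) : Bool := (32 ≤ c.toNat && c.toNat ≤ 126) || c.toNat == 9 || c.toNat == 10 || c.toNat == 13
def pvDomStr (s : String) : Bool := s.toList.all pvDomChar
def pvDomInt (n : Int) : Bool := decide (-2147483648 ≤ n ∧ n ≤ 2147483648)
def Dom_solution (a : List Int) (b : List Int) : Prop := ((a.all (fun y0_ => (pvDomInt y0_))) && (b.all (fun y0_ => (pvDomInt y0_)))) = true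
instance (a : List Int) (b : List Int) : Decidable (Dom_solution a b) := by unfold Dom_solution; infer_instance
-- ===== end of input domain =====

-- B replaces A's stateful one-pass flag machine by collect-the-differing-pairs then classify by count (simpler decomposition, same O(n) cost).

-- ===== PORT A =====
-- loop state: w = was_swapped, s = swapped_numbers (None → none)
def solLoopA : List (Int × Int) → Bool → Option (Int × Int) → Bool
  | [], _, _ => true
  | (ea, eb) :: rest, w, s =>
    let are_different := ea != eb
    let swapped_are_equal := (some (eb, ea) == s)
    if s == none && are_different then
      solLoopA rest w (some (ea, eb))
    else if (s != none) && are_different && swapped_are_equal && !w then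
      solLoopA rest true s
    else if (s != none) && are_different && (!swapped_are_equal || w) then
      false
    else
      solLoopA rest w s

def solution (a : List Int) (b : List Int) : Bool :=
  solLoopA (a.zip b) false none

-- ===== PORT B =====
def solution_alt (a : List Int) (b : List Int) : Bool :=
  let diffs := (a.zip b).filter (fun p => p.1 != p.2)
  if diffs.length ≤ 1 then true
  else if diffs.length = 2 then
    decide (diffs[0]! = ((diffs[1]!).2, (diffs[1]!).1))
  else false

-- ===== PRECONDITION & SPEC =====
def Spec_solution (a : List Int) (b : List Int) (out : Bool) : Prop := out = solution_alt a b
instance (a : List Int) (b : List Int) (out : Bool) : Decidable (Spec_solution a b out) := by unfold Spec_solution; infer_instance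

-- ===== CLAIM (what is proved, stated in full; the proofs are below) =====
def Claim_equal_solution : Prop := ∀ (a : List Int) (b : List Int), Dom_solution a b → Spec_solution a b (solution a b)

-- ===== LEMMAS AND PROOFS =====

-- once was_swapped is set, A returns true iff no further mismatch occurs
theorem solLoopA_true (l : List (Int × Int)) (x y : Int) :
    solLoopA l true (some (x, y)) = (l.filter (fun p => p.1 != p.2)).isEmpty := by
  induction l with
  | nil => rfl
  | cons p rest ih =>
    obtain ⟨ea, eb⟩ := p
    by_cases h : ea = eb
    · subst h
      simp [solLoopA, ih]
    · simp [solLoopA, h]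

-- with one mismatch (x,y) recorded, A returns true iff the remaining mismatches are
-- exactly [] or a single reversed pair (y,x)
theorem solLoopA_some (l : List (Int × Int)) (x y : Int) :
    solLoopA l false (some (x, y)) =
      (match l.filter (fun p => p.1 != p.2) with
        | [] => true
        | (p, q) :: rest => decide ((q, p) = (x, y)) && rest.isEmpty) := by
  induction l with
  | nil => rfl
  | cons pr rest ih =>
    obtain ⟨ea, eb⟩ := pr
    by_cases h : ea = eb
    · subst h
      simp only [solLoopA]
      simp [ih]
    · by_cases hs : (eb, ea) = (x, y)
      · obtain ⟨h1, h2⟩ := Prod.mk.injEq .. ▸ hs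
        subst h1; subst h2
        simp only [solLoopA]
        simp [h, solLoopA_true]
      · simp only [solLoopA]
        simp [h, hs]

theorem solLoopA_none (l : List (Int × Int)) :
    solLoopA l false none =
      (let diffs := l.filter (fun p => p.1 != p.2)
       if diffs.length ≤ 1 then true
       else if diffs.length = 2 then
         decide (diffs[0]! = ((diffs[1]!).2, (diffs[1]!).1))
       else false) := by
  induction l with
  | nil => rfl
  | cons pr rest ih =>
    obtain ⟨ea, eb⟩ := pr
    by_cases h : ea = eb
    · subst h
      simp only [solLoopA]
      simp [ih]
    · have hstep : solLoopA ((ea, eb) :: rest) false none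
          = solLoopA rest false (some (ea, eb)) := by
        simp [solLoopA, h]
      have hfil : ((ea, eb) :: rest).filter (fun p => p.1 != p.2)
          = (ea, eb) :: rest.filter (fun p => p.1 != p.2) := by
        simp [h]
      rw [hstep, solLoopA_some, hfil]
      rcases hd : rest.filter (fun p => p.1 != p.2) with _ | ⟨⟨p, q⟩, rest'⟩
      · rw [hd]; simp
      · rcases rest' with _ | ⟨r2, rest''⟩
        · rw [hd]; simp [eq_comm]
        · rw [hd]; simp

-- ===== VERDICT (by name: the statement is the Claim_ definition above) =====
theorem solution_spec : Claim_equal_solution := by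
  intro a b _
  unfold Spec_solution solution solution_alt
  exact solLoopA_none (a.zip b)
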